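-- pv_equiv track=rewrite | github.com/leonov-av/vulristics | functions_tools.py | get_sorted_list_from_weighted_dict
-- ===== SOURCE A (Python) =====
-- def get_sorted_list_from_weighted_dict(dictionary, combined_cve_data_all=None):
--     weight_to_item = dict()
--     all_weights = set()
--     for item in dictionary:
--         all_weights.add(dictionary[item])
--         if not dictionary[item] in weight_to_item:
--             weight_to_item[dictionary[item]] = list()
--         weight_to_item[dictionary[item]].append(item)
--     all_weights = list(all_weights)
--     all_weights.sort(reverse=True)
--     results = list()
--     for weight in all_weights:
--         if combined_cve_data_all: # Vulnerability sorting
--             items = weight_to_item[weight]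
--             new_id_to_item = dict()
--             for item in items:
--                 new_id_to_item[combined_cve_data_all[item]['vuln_type'] + " - " +
--                       combined_cve_data_all[item]['vuln_product'] + " - " + item] = item
--             new_ids = list(new_id_to_item.keys())
--             new_ids.sort()
--             for new_id in new_ids:
--                 results.append(new_id_to_item[new_id])
--         else:
--             items = weight_to_item[weight]
--             items.sort()
--             for item in items:
--                 results.append(item)
--     return (results)
-- ===== SOURCE B (Python) =====
-- def get_sorted_list_from_weighted_dict(dictionary, combined_cve_data_all=None):
--     def secondary(item):
--         if combined_cve_data_all:  # Vulnerability sorting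
--             data = combined_cve_data_all[item]
--             return data['vuln_type'] + " - " + data['vuln_product'] + " - " + item
--         return item
--     results = sorted(dictionary, key=secondary)
--     results.sort(key=lambda item: dictionary[item], reverse=True)
--     return results
-- ===== Notes on version B (the rewrite author's own statement) =====
-- stated objective: simpler
-- what changed: Replaces A's weight-to-items bucket dict, weight set, and nested per-bucket sorts (via an id-keyed dict) with a single flat double stable sort of the dict's keys: sort by the secondary id ascending, then stable-sort by weight with reverse=True.
-- intended difference: When combined_cve_data_all is truthy and two equally-weighted items have the same composite 'vuln_type - vuln_product - item' id, A's id-keyed dict overwrites one item with the other and silently drops it from the result, while B keeps every item (ties broken by dict order), which is the intended behaviour for a function that only reorders. — e.g. on get_sorted_list_from_weighted_dict(([("x", 1), ("c - x", 1)], some [("x", [("vuln_type", "a"), ("vuln_product", "b - c")]), ("c - x", [("vuln_type", "a"),…): A returns ["c - x"], B returns ["x", "c - x"]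
-- outside the precondition, e.g. on get_sorted_list_from_weighted_dict({'a': 1}, {'b': {}}): A raises KeyError, B raises KeyError
import Mathlib
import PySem

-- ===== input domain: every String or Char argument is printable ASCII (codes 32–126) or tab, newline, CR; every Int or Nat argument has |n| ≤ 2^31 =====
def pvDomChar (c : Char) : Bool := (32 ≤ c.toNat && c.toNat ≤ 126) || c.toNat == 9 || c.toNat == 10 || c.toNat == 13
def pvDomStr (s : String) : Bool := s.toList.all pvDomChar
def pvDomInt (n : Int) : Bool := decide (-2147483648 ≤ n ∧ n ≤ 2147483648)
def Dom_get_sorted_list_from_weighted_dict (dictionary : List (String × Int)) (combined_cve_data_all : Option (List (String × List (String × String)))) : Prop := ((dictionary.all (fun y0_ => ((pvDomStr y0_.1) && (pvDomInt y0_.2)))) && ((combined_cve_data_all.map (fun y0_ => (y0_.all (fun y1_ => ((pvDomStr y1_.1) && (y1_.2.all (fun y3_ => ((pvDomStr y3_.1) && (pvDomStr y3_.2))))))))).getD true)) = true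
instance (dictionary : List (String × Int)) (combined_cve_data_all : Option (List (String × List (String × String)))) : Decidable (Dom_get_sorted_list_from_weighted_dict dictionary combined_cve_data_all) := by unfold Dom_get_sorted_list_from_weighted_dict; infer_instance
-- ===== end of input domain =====

-- B replaces A's weight-bucket dict with nested per-bucket sorts by one stable double sort of the
-- keys (secondary id ascending, then weight descending); objective: simpler.  Return value only:
-- neither version mutates its arguments.
-- String sort keys are ported as their code-point lists ('.toList'): CPython compares str by code
-- points, which is exactly the lexicographic order on 'List Char'.

-- the composite sorting id 'vuln_type - vuln_product - item' both versions build from the input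
def pvSecondaryId (l : List (String × List (String × String))) (k : String) : String :=
  (PySem.Dict.mk ((PySem.Dict.mk l).getD k [])).getD "vuln_type" "" ++ " - " ++
  (PySem.Dict.mk ((PySem.Dict.mk l).getD k [])).getD "vuln_product" "" ++ " - " ++ k

-- ===== PORT A =====
def get_sorted_list_from_weighted_dict (dictionary : List (String × Int)) (combined_cve_data_all : Option (List (String × List (String × String)))) : List String :=
  -- 'dictionary[item]' while iterating the dict's own keys: the key is always present, the getD
  -- default 0 is never used (Pre_ keeps the association list a faithful dict: Nodup keys).
  let wt : String → Int := fun item => (PySem.Dict.mk dictionary).getD item 0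
  let st :=
    (dictionary.map Prod.fst).foldl
      (fun (st : PySem.Set Int × PySem.Dict Int (List String)) item =>
        (PySem.Set.add st.1 (wt item),
         (if (st.2.contains (wt item)) then st.2 else st.2.insert (wt item) []).modify
           (wt item) [] (· ++ [item])))
      (PySem.Set.empty, PySem.Dict.empty)
  let all_weights := PySem.List.sorted (st.1 : List Int) (fun w => w) true
  all_weights.foldl
    (fun results weight =>
      match combined_cve_data_all with
      | some l =>
        if l.isEmpty then
          -- an empty dict is falsy in Python: same branch as None
          let items := PySem.List.sorted (st.2.getD weight []) (fun x => x.toList) false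
          items.foldl (fun r item => r ++ [item]) results
        else
          let items := st.2.getD weight []
          let new_id_to_item :=
            items.foldl
              (fun (d : PySem.Dict String String) item => d.insert (pvSecondaryId l item) item)
              PySem.Dict.empty
          let new_ids := PySem.List.sorted new_id_to_item.keys (fun x => x.toList) false
          new_ids.foldl (fun r new_id => r ++ [new_id_to_item.getD new_id ""]) results
      | none =>
        let items := PySem.List.sorted (st.2.getD weight []) (fun x => x.toList) false
        items.foldl (fun r item => r ++ [item]) results)
    []

-- ===== PORT B =====
def get_sorted_list_from_weighted_dict_alt (dictionary : List (String × Int)) (combined_cve_data_all : Option (List (String × List (String × String)))) : List String :=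
  let secondary : String → String := fun item =>
    match combined_cve_data_all with
    | some l => if l.isEmpty then item else pvSecondaryId l item
    | none => item
  let results := PySem.List.sorted (dictionary.map Prod.fst) (fun item => (secondary item).toList) false
  PySem.List.sorted results (fun item => (PySem.Dict.mk dictionary).getD item 0) true

-- ===== PRECONDITION & SPEC =====
-- Pre_ excludes (a) association lists with duplicate keys in the dictionary, in combined_cve_data_all
-- or in one of its records, on which the list is an ambiguous representation of a Python dict
-- (first-match lookup vs dict's last-wins construction), and (b) inputs on which A raises KeyError
-- because a weighted item is missing from combined_cve_data_all or its record lacks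
-- 'vuln_type'/'vuln_product'.
def Pre_get_sorted_list_from_weighted_dict (dictionary : List (String × Int)) (combined_cve_data_all : Option (List (String × List (String × String)))) : Prop :=
  (dictionary.map Prod.fst).Nodup ∧
  ∀ l ∈ combined_cve_data_all.toList,
    (l.map Prod.fst).Nodup ∧ (∀ r ∈ l, (r.2.map Prod.fst).Nodup) ∧
    (l ≠ [] → ∀ k ∈ dictionary.map Prod.fst,
      (PySem.Dict.mk l).contains k = true ∧
      (PySem.Dict.mk ((PySem.Dict.mk l).getD k [])).contains "vuln_type" = true ∧
      (PySem.Dict.mk ((PySem.Dict.mk l).getD k [])).contains "vuln_product" = true)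
instance (dictionary : List (String × Int)) (combined_cve_data_all : Option (List (String × List (String × String)))) : Decidable (Pre_get_sorted_list_from_weighted_dict dictionary combined_cve_data_all) := by unfold Pre_get_sorted_list_from_weighted_dict; infer_instance

def pvWitness_get_sorted_list_from_weighted_dict : (List (String × Int)) × (Option (List (String × List (String × String)))) :=
  ([("a", 3), ("b", 1), ("c", 3)], some [("a", [("vuln_type", "RCE"), ("vuln_product", "X")]), ("b", [("vuln_type", "DoS"), ("vuln_product", "Y")]), ("c", [("vuln_type", "RCE"), ("vuln_product", "Y")])])

-- On dictionaries holding two equally-weighted keys whose composite ids collide, A's id-keyed dict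
-- overwrites one item with the other and silently DROPS it from the result; B keeps every item
-- (collided ids tie, the stable sort keeps dict order), which is the intended value for a function
-- that only reorders.
def D_get_sorted_list_from_weighted_dict (dictionary : List (String × Int)) (combined_cve_data_all : Option (List (String × List (String × String)))) : Prop :=
  ∃ l ∈ combined_cve_data_all.toList, l ≠ [] ∧
    ∃ a ∈ dictionary, ∃ b ∈ dictionary,
      a ≠ b ∧ a.2 = b.2 ∧ pvSecondaryId l a.1 = pvSecondaryId l b.1
instance (dictionary : List (String × Int)) (combined_cve_data_all : Option (List (String × List (String × String)))) : Decidable (D_get_sorted_list_from_weighted_dict dictionary combined_cve_data_all) := by unfold D_get_sorted_list_from_weighted_dict; infer_instance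

def Spec_get_sorted_list_from_weighted_dict (dictionary : List (String × Int)) (combined_cve_data_all : Option (List (String × List (String × String)))) (out : List String) : Prop := ¬ D_get_sorted_list_from_weighted_dict dictionary combined_cve_data_all → out = get_sorted_list_from_weighted_dict_alt dictionary combined_cve_data_all
instance (dictionary : List (String × Int)) (combined_cve_data_all : Option (List (String × List (String × String)))) (out : List String) : Decidable (Spec_get_sorted_list_from_weighted_dict dictionary combined_cve_data_all out) := by unfold Spec_get_sorted_list_from_weighted_dict; infer_instance

def pvDiffWitness_get_sorted_list_from_weighted_dict : (List (String × Int)) × (Option (List (String × List (String × String)))) :=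
  ([("x", 1), ("c - x", 1)], some [("x", [("vuln_type", "a"), ("vuln_product", "b - c")]), ("c - x", [("vuln_type", "a"), ("vuln_product", "b")])])
def pvDiffWitnessOut_get_sorted_list_from_weighted_dict : (List String) × (List String) :=
  (["c - x"], ["x", "c - x"])

-- ===== CLAIM (what is proved, stated in full; the proofs are below) =====
def Claim_unchanged_get_sorted_list_from_weighted_dict : Prop := ∀ (dictionary : List (String × Int)) (combined_cve_data_all : Option (List (String × List (String × String)))), Dom_get_sorted_list_from_weighted_dict dictionary combined_cve_data_all → Pre_get_sorted_list_from_weighted_dict dictionary combined_cve_data_all → Spec_get_sorted_list_from_weighted_dict dictionary combined_cve_data_all (get_sorted_list_from_weighted_dict dictionary combined_cve_data_all)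
def Claim_changed_get_sorted_list_from_weighted_dict : Prop := Dom_get_sorted_list_from_weighted_dict (pvDiffWitness_get_sorted_list_from_weighted_dict.1) (pvDiffWitness_get_sorted_list_from_weighted_dict.2) ∧ Pre_get_sorted_list_from_weighted_dict (pvDiffWitness_get_sorted_list_from_weighted_dict.1) (pvDiffWitness_get_sorted_list_from_weighted_dict.2) ∧ D_get_sorted_list_from_weighted_dict (pvDiffWitness_get_sorted_list_from_weighted_dict.1) (pvDiffWitness_get_sorted_list_from_weighted_dict.2) ∧ get_sorted_list_from_weighted_dict (pvDiffWitness_get_sorted_list_from_weighted_dict.1) (pvDiffWitness_get_sorted_list_from_weighted_dict.2) = pvDiffWitnessOut_get_sorted_list_from_weighted_dict.1 ∧ get_sorted_list_from_weighted_dict_alt (pvDiffWitness_get_sorted_list_from_weighted_dict.1) (pvDiffWitness_get_sorted_list_from_weighted_dict.2) = pvDiffWitnessOut_get_sorted_list_from_weighted_dict.2 ∧ pvDiffWitnessOut_get_sorted_list_from_weighted_dict.1 ≠ pvDiffWitnessOut_get_sorted_list_from_weighted_dict.2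
def Claim_exact_get_sorted_list_from_weighted_dict : Prop := ∀ (dictionary : List (String × Int)) (combined_cve_data_all : Option (List (String × List (String × String)))), Dom_get_sorted_list_from_weighted_dict dictionary combined_cve_data_all → Pre_get_sorted_list_from_weighted_dict dictionary combined_cve_data_all → D_get_sorted_list_from_weighted_dict dictionary combined_cve_data_all → get_sorted_list_from_weighted_dict dictionary combined_cve_data_all ≠ get_sorted_list_from_weighted_dict_alt dictionary combined_cve_data_all

-- ===== LEMMAS AND PROOFS =====

-- the order A and B both realise: weight descending, then secondary id ascending
def pvR (wt : String → Int) (cp : String → List Char) (a b : String) : Prop :=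
  wt b < wt a ∨ (wt a = wt b ∧ cp a < cp b)

-- B's effective secondary-key function
def pvKeyFn (combined_cve_data_all : Option (List (String × List (String × String)))) : String → String :=
  fun item =>
    match combined_cve_data_all with
    | some l => if l.isEmpty then item else pvSecondaryId l item
    | none => item

lemma pv_alt_eq (dictionary : List (String × Int)) (combined_cve_data_all : Option (List (String × List (String × String)))) :
    get_sorted_list_from_weighted_dict_alt dictionary combined_cve_data_all
      = PySem.List.sorted
          (PySem.List.sorted (dictionary.map Prod.fst) (fun item => (pvKeyFn combined_cve_data_all item).toList) false)
          (fun item => (PySem.Dict.mk dictionary).getD item 0) true := rfl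

-- with Nodup keys, the dict lookup of a key returns its entry's value
lemma pv_getD_of_mem (dictionary : List (String × Int)) (hnd : (dictionary.map Prod.fst).Nodup)
    (p : String × Int) (hp : p ∈ dictionary) : (PySem.Dict.mk dictionary).getD p.1 0 = p.2 := by
  have hmem : (p.1, p.2) ∈ (PySem.Dict.mk dictionary).items := hp
  exact PySem.Dict.getD_of_mem_items _ hmem hnd 0

-- the inferred core lexicographic order on 'List Char' is the Mathlib linear order (same relation;
-- the decision procedures are identified by proof irrelevance)
lemma pv_instEq (xs : List String) (key : String → List Char) (rev : Bool) :
    PySem.List.sorted xs key rev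
      = @PySem.List.sorted String (List Char) List.instLinearOrder.toLT List.instLinearOrder.toDecidableLT xs key rev := by
  rw [Subsingleton.elim (fun (a b : List Char) => a.decidableLT b) (List.instLinearOrder.toDecidableLT)]

-- two lists sorted by the same (weight desc, id asc) order and permutations of each other are equal
lemma pv_eq_of_perm (wt : String → Int) (cp : String → List Char) {l₁ l₂ : List String}
    (hp : l₁.Perm l₂) (h1 : l₁.Pairwise (pvR wt cp)) (h2 : l₂.Pairwise (pvR wt cp)) : l₁ = l₂ := by
  refine List.eq_of_perm_of_sorted ?_ h1 h2 hp
  intro a b _ _ hab hba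
  rcases hab with h | ⟨he, hc⟩
  · rcases hba with h' | ⟨he', _⟩
    · omega
    · omega
  · rcases hba with h' | ⟨_, hc'⟩
    · omega
    · exact absurd hc' (lt_asymm hc)

-- stability of the reverse weight sort: x is inserted behind every earlier, smaller-id element of
-- its own weight and before every strictly lighter element
lemma pv_insertBy_pairwise (wt : String → Int) (cp : String → List Char) (x : String) :
    ∀ (acc : List String), acc.Pairwise (pvR wt cp) →
    (∀ y ∈ acc, cp y ≤ cp x ∧ (wt y = wt x → cp y ≠ cp x)) →
    (PySem.List.insertBy (fun a b => decide (wt b < wt a)) x acc).Pairwise (pvR wt cp)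
  | [], _, _ => by simp [PySem.List.insertBy]
  | y :: ys, hacc, hx => by
    rw [List.pairwise_cons] at hacc
    show (if decide (wt y < wt x) then x :: y :: ys else
        y :: PySem.List.insertBy (fun a b => decide (wt b < wt a)) x ys).Pairwise (pvR wt cp)
    split_ifs with h
    · rw [decide_eq_true_eq] at h
      refine List.pairwise_cons.2 ⟨?_, List.pairwise_cons.2 hacc⟩
      intro z hz
      rcases List.mem_cons.1 hz with rfl | hz
      · exact Or.inl h
      · rcases hacc.1 z hz with h' | ⟨h', _⟩
        · exact Or.inl (by omega)
        · exact Or.inl (by omega)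
    · rw [decide_eq_true_eq] at h
      refine List.pairwise_cons.2 ⟨?_, ?_⟩
      · intro z hz
        rcases (PySem.List.mem_insertBy _ _ _ _).1 hz with rfl | hz
        · have hyx := hx y List.mem_cons_self
          rcases lt_or_eq_of_le (not_lt.1 h) with hlt | heq
          · exact Or.inl hlt
          · exact Or.inr ⟨heq.symm, lt_of_le_of_ne hyx.1 (hyx.2 heq.symm)⟩
        · exact hacc.1 z hz
      · exact pv_insertBy_pairwise wt cp x ys hacc.2
          (fun y hy => hx y (List.mem_cons_of_mem _ hy))

lemma pv_foldl_insertBy_pairwise (wt : String → Int) (cp : String → List Char) :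
    ∀ (xs acc : List String), acc.Pairwise (pvR wt cp) →
    (∀ y ∈ acc, ∀ x ∈ xs, cp y ≤ cp x ∧ (wt y = wt x → cp y ≠ cp x)) →
    xs.Pairwise (fun a b => cp a ≤ cp b ∧ (wt a = wt b → cp a ≠ cp b)) →
    (xs.foldl (fun acc x => PySem.List.insertBy (fun a b => decide (wt b < wt a)) x acc) acc).Pairwise (pvR wt cp)
  | [], acc, hacc, _, _ => hacc
  | x :: xs, acc, hacc, hcross, hxs => by
    rw [List.pairwise_cons] at hxs
    refine pv_foldl_insertBy_pairwise wt cp xs _ ?_ ?_ hxs.2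
    · exact pv_insertBy_pairwise wt cp x acc hacc
        (fun y hy => hcross y hy x List.mem_cons_self)
    · intro y hy x' hx'
      rcases (PySem.List.mem_insertBy _ _ _ _).1 hy with rfl | hy
      · exact hxs.1 x' hx'
      · exact hcross y hy x' (List.mem_cons_of_mem _ hx')

-- B's result is ordered by (weight desc, id asc)
lemma pv_B_pairwise (wt : String → Int) (cp : String → List Char) (keys : List String)
    (hQ : keys.Pairwise (fun a b => wt a = wt b → cp a ≠ cp b)) :
    (PySem.List.sorted (PySem.List.sorted keys cp false) wt true).Pairwise (pvR wt cp) := by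
  rw [PySem.List.sorted_rev_eq_foldl_insertBy]
  refine pv_foldl_insertBy_pairwise wt cp _ [] (by simp) (by simp) ?_
  have hle : (PySem.List.sorted keys cp false).Pairwise (fun a b => cp a ≤ cp b) := by
    have := PySem.List.sorted_pairwise keys cp
    rwa [← pv_instEq] at this
  have hsym : ∀ {a b : String}, (wt a = wt b → cp a ≠ cp b) → (wt b = wt a → cp b ≠ cp a) :=
    fun h he hc => h he.symm hc.symm
  have hq2 : (PySem.List.sorted keys cp false).Pairwise (fun a b => wt a = wt b → cp a ≠ cp b) :=
    ((PySem.List.sorted_perm keys cp false).pairwise_iff @hsym).2 hQ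
  exact hle.and hq2

-- A's weight buckets are filters of the key list
lemma pv_if_insert_getD (d : PySem.Dict Int (List String)) (k w : Int) :
    (if d.contains k then d else d.insert k []).getD w [] = d.getD w [] := by
  split_ifs with h
  · rfl
  · rw [PySem.Dict.getD_insert]
    split_ifs with h2
    · subst h2; exact (PySem.Dict.getD_of_not_contains d [] (by simpa using h)).symm
    · rfl

lemma pv_bucket (wt : String → Int) :
    ∀ (keys : List String) (d : PySem.Dict Int (List String)) (w : Int),
    ((keys.foldl (fun d item =>
        (if d.contains (wt item) then d else d.insert (wt item) []).modify (wt item) [] (· ++ [item])) d).getD w [])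
      = d.getD w [] ++ keys.filter (fun k => wt k == w)
  | [], d, w => by simp
  | x :: keys, d, w => by
    rw [List.foldl_cons, pv_bucket wt keys _ w]
    have hd : ∀ w', ((if d.contains (wt x) then d else d.insert (wt x) []).modify (wt x) [] (· ++ [x])).getD w' []
        = if w' = wt x then d.getD (wt x) [] ++ [x] else d.getD w' [] := by
      intro w'
      rw [PySem.Dict.getD_modify]
      simp only [pv_if_insert_getD]
    rw [hd w, List.filter_cons]
    by_cases hw : wt x = w
    · simp [hw, List.append_assoc]
    · have : (wt x == w) = false := by simpa using hw
      simp [this, Ne.symm hw]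

-- elements of a Nodup-image map are distinguished by the map
lemma pv_map_nodup_inj {α β : Type} (f : α → β) :
    ∀ (l : List α), (l.map f).Nodup → ∀ a ∈ l, ∀ b ∈ l, f a = f b → a = b
  | [], _, a, ha, _, _, _ => absurd ha List.not_mem_nil
  | x :: xs, hnd, a, ha, b, hb, hf => by
    rw [List.map_cons, List.nodup_cons] at hnd
    rcases List.mem_cons.1 ha with rfl | ha'
    · rcases List.mem_cons.1 hb with rfl | hb'
      · rfl
      · exfalso
        apply hnd.1
        rw [hf]
        exact List.mem_map_of_mem hb'
    · rcases List.mem_cons.1 hb with rfl | hb'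
      · exfalso
        apply hnd.1
        rw [← hf]
        exact List.mem_map_of_mem ha'
      · exact pv_map_nodup_inj f xs hnd.2 a ha' b hb' hf

-- ¬D_ turned into the pairwise key property the sort lemmas need
lemma pv_HQ_of_not_D (dictionary : List (String × Int)) (l : List (String × List (String × String)))
    (hnd : (dictionary.map Prod.fst).Nodup) (hlne : l ≠ [])
    (hD : ¬ D_get_sorted_list_from_weighted_dict dictionary (some l)) :
    (dictionary.map Prod.fst).Pairwise (fun a b =>
      (PySem.Dict.mk dictionary).getD a 0 = (PySem.Dict.mk dictionary).getD b 0 →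
      pvSecondaryId l a ≠ pvSecondaryId l b) := by
  have hforall : ∀ a ∈ dictionary, ∀ b ∈ dictionary, a ≠ b → a.2 = b.2 →
      pvSecondaryId l a.1 ≠ pvSecondaryId l b.1 := by
    intro a ha b hb hab hw hid
    exact hD ⟨l, by simp, hlne, a, ha, b, hb, hab, hw, hid⟩
  have hend : dictionary.Pairwise (fun p q => p ≠ q) := hnd.of_map
  refine List.pairwise_map.2 (List.Pairwise.imp_of_mem ?_ hend)
  intro p q hp hq hpq hw
  refine hforall p hp q hq hpq ?_
  rw [← pv_getD_of_mem dictionary hnd p hp, ← pv_getD_of_mem dictionary hnd q hq]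
  exact hw

-- the truthy branch of A over one bucket appends the id-sorted bucket
set_option maxHeartbeats 1000000 in
lemma pv_truthy_chunk (l : List (String × List (String × String))) (group : List String) (res : List String)
    (hnd : (group.map (pvSecondaryId l)).Nodup) :
    (PySem.List.sorted
        (group.foldl (fun (d : PySem.Dict String String) item => d.insert (pvSecondaryId l item) item) PySem.Dict.empty).keys
        (fun x => x.toList) false).foldl
      (fun r new_id => r ++ [(group.foldl (fun (d : PySem.Dict String String) item => d.insert (pvSecondaryId l item) item) PySem.Dict.empty).getD new_id ""]) res
    = res ++ PySem.List.sorted group (fun item => (pvSecondaryId l item).toList) false := by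
  have hitems : (group.foldl (fun (d : PySem.Dict String String) item => d.insert (pvSecondaryId l item) item) PySem.Dict.empty).items
      = group.map (fun item => (pvSecondaryId l item, item)) := by
    have := PySem.Dict.items_foldl_insert_fresh group (pvSecondaryId l) (fun a => a) PySem.Dict.empty
      (fun a _ => PySem.Dict.contains_empty _) hnd
    simpa using this
  set d := group.foldl (fun (d : PySem.Dict String String) item => d.insert (pvSecondaryId l item) item) PySem.Dict.empty with hdd
  have hkeys : d.keys = group.map (pvSecondaryId l) := by
    show d.items.map Prod.fst = _
    rw [hitems, List.map_map]; rfl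
  have hgp : group.Pairwise (fun a b => pvSecondaryId l a ≠ pvSecondaryId l b) := List.pairwise_map.mp hnd
  have hsym : ∀ {a b : String}, pvSecondaryId l a ≠ pvSecondaryId l b → pvSecondaryId l b ≠ pvSecondaryId l a :=
    fun h => h.symm
  have hA : (PySem.List.sorted group (fun item => (pvSecondaryId l item).toList) false).Pairwise
      (fun a b => (pvSecondaryId l a).toList ≤ (pvSecondaryId l b).toList) := by
    have := PySem.List.sorted_pairwise group (fun item => (pvSecondaryId l item).toList)
    rwa [← pv_instEq] at this
  have hB : (PySem.List.sorted group (fun item => (pvSecondaryId l item).toList) false).Pairwise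
      (fun a b => pvSecondaryId l a ≠ pvSecondaryId l b) :=
    ((PySem.List.sorted_perm group (fun item => (pvSecondaryId l item).toList) false).pairwise_iff @hsym).2 hgp
  have hsortid : PySem.List.sorted (group.map (pvSecondaryId l)) (fun x => x.toList) false
      = (PySem.List.sorted group (fun item => (pvSecondaryId l item).toList) false).map (pvSecondaryId l) := by
    have h := PySem.List.sorted_eq_of_perm_of_pairwise_lt
      (group.map (pvSecondaryId l))
      ((PySem.List.sorted group (fun item => (pvSecondaryId l item).toList) false).map (pvSecondaryId l))
      (fun x => x.toList)
      ((PySem.List.sorted_perm group (fun item => (pvSecondaryId l item).toList) false).map _)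
      (by
        refine List.pairwise_map.2 ?_
        exact (hA.and hB).imp (fun {a b} h =>
          lt_of_le_of_ne h.1 (fun he => h.2 (String.toList_injective he))))
    rwa [← pv_instEq] at h
  rw [hkeys, hsortid, PySem.List.foldl_append_singleton_eq_map, List.map_map]
  congr 1
  refine (List.map_congr_left ?_).trans (List.map_id _)
  intro item hitem
  have hmem : (pvSecondaryId l item, item) ∈ d.items := by
    rw [hitems]
    exact List.mem_map_of_mem ((PySem.List.mem_sorted _ _ _ _).1 hitem)
  have hknd : d.keys.Nodup := by rw [hkeys]; exact hnd
  exact PySem.Dict.getD_of_mem_items d hmem hknd ""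

-- keys partition into their weight buckets
lemma pv_flatMap_perm {α β : Type} (f g : α → List β) :
    ∀ (ws : List α), (∀ w ∈ ws, (f w).Perm (g w)) → (ws.flatMap f).Perm (ws.flatMap g)
  | [], _ => by simp
  | w :: ws, h => by
    simp only [List.flatMap_cons]
    exact (h w List.mem_cons_self).append
      (pv_flatMap_perm f g ws (fun w' hw' => h w' (List.mem_cons_of_mem _ hw')))

lemma pv_flatMap_congr {α β : Type} (f g : α → List β) :
    ∀ (ws : List α), (∀ w ∈ ws, f w = g w) → ws.flatMap f = ws.flatMap g
  | [], _ => rfl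
  | w :: ws, h => by
    simp only [List.flatMap_cons]
    rw [h w List.mem_cons_self, pv_flatMap_congr f g ws (fun w' hw' => h w' (List.mem_cons_of_mem _ hw'))]

lemma pv_partition (wt : String → Int) :
    ∀ (ws : List Int) (l : List String), ws.Nodup → (∀ k ∈ l, wt k ∈ ws) →
    (ws.flatMap (fun w => l.filter (fun k => wt k == w))).Perm l
  | [], l, _, hcov => by
    cases l with
    | nil => simp
    | cons x xs => exact absurd (hcov x List.mem_cons_self) (by simp)
  | w :: ws, l, hnd, hcov => by
    rw [List.nodup_cons] at hnd
    rw [List.flatMap_cons]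
    have hrw : ws.flatMap (fun w' => l.filter (fun k => wt k == w'))
        = ws.flatMap (fun w' => (l.filter (fun k => !(wt k == w))).filter (fun k => wt k == w')) := by
      refine pv_flatMap_congr _ _ ws ?_
      intro w' hw'
      rw [List.filter_filter]
      refine (List.filter_congr ?_).symm
      intro k _
      by_cases h : wt k = w'
      · have h3 : (w' == w) = false := by
          simp only [beq_eq_false_iff_ne, ne_eq]
          intro he; exact hnd.1 (he ▸ hw')
        simp [h, h3]
      · have h1 : (wt k == w') = false := by simpa using h
        simp [h1]
    rw [hrw]
    have hperm := pv_partition wt ws (l.filter (fun k => !(wt k == w))) hnd.2 ?_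
    · exact (List.Perm.append_left _ hperm).trans (List.filter_append_perm _ l)
    · intro k hk
      rw [List.mem_filter] at hk
      rcases List.mem_cons.1 (hcov k hk.1) with h | h
      · exact absurd (by simpa using h) (by simpa using hk.2)
      · exact h

-- a list with a repetition strictly shrinks under dedup
lemma pv_len_ofList_lt : ∀ (xs : List String), ¬ xs.Nodup → (PySem.Set.ofList xs).length < xs.length
  | [], h => absurd List.nodup_nil h
  | x :: xs, h => by
    rw [PySem.Set.ofList_cons]
    have hdisc : (PySem.Set.ofList xs).discard x = (PySem.Set.ofList xs).filter (fun y => !(y == x)) := rfl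
    by_cases hx : x ∈ xs
    · have hxo : x ∈ PySem.Set.ofList xs := (PySem.Set.mem_ofList xs x).2 hx
      have h1 : ((PySem.Set.ofList xs).discard x).length < (PySem.Set.ofList xs).length := by
        rw [hdisc]
        exact List.length_filter_lt_length_iff_exists.2 ⟨x, hxo, by simp⟩
      have h2 := PySem.Set.length_ofList_le xs
      simp only [List.length_cons]
      omega
    · have hnd : ¬ xs.Nodup := fun hn => h (List.nodup_cons.2 ⟨hx, hn⟩)
      have h1 := pv_len_ofList_lt xs hnd
      have h2 : ((PySem.Set.ofList xs).discard x).length ≤ (PySem.Set.ofList xs).length := by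
        rw [hdisc]; exact List.length_filter_le _ _
      simp only [List.length_cons]
      omega

-- A rewritten: the set/bucket loop evaluated
set_option maxHeartbeats 1000000 in
lemma pv_A_eq (dictionary : List (String × Int)) (combined_cve_data_all : Option (List (String × List (String × String)))) :
    get_sorted_list_from_weighted_dict dictionary combined_cve_data_all
      = (PySem.List.sorted
          ((PySem.Set.ofList ((dictionary.map Prod.fst).map (fun item => (PySem.Dict.mk dictionary).getD item 0))) : List Int)
          (fun w => w) true).foldl
        (fun results weight =>
          match combined_cve_data_all with
          | some l =>
            if l.isEmpty then
              results ++ PySem.List.sorted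
                ((dictionary.map Prod.fst).filter (fun k => (PySem.Dict.mk dictionary).getD k 0 == weight))
                (fun x => x.toList) false
            else
              (PySem.List.sorted
                (((dictionary.map Prod.fst).filter (fun k => (PySem.Dict.mk dictionary).getD k 0 == weight)).foldl
                  (fun (d : PySem.Dict String String) item => d.insert (pvSecondaryId l item) item)
                  PySem.Dict.empty).keys (fun x => x.toList) false).foldl
                (fun r new_id => r ++ [(((dictionary.map Prod.fst).filter (fun k => (PySem.Dict.mk dictionary).getD k 0 == weight)).foldl
                  (fun (d : PySem.Dict String String) item => d.insert (pvSecondaryId l item) item)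
                  PySem.Dict.empty).getD new_id ""]) results
          | none =>
            results ++ PySem.List.sorted
              ((dictionary.map Prod.fst).filter (fun k => (PySem.Dict.mk dictionary).getD k 0 == weight))
              (fun x => x.toList) false)
        [] := by
  simp only [get_sorted_list_from_weighted_dict]
  simp only [PySem.List.foldl_prod_mk
    (f := fun (s : PySem.Set Int) (item : String) => PySem.Set.add s ((PySem.Dict.mk dictionary).getD item 0))
    (g := fun (d : PySem.Dict Int (List String)) (item : String) =>
      (if d.contains ((PySem.Dict.mk dictionary).getD item 0) then d
       else d.insert ((PySem.Dict.mk dictionary).getD item 0) []).modify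
        ((PySem.Dict.mk dictionary).getD item 0) [] (· ++ [item]))]
  have hset : (dictionary.map Prod.fst).foldl
      (fun (s : PySem.Set Int) (item : String) => PySem.Set.add s ((PySem.Dict.mk dictionary).getD item 0))
      PySem.Set.empty
      = PySem.Set.ofList ((dictionary.map Prod.fst).map (fun item => (PySem.Dict.mk dictionary).getD item 0)) := by
    rw [← PySem.Set.update_map_eq_foldl_add]
    exact PySem.Set.update_nil_left _
  rw [hset]
  refine PySem.List.foldl_congr_mem _ _ _ _ ?_
  intro acc w _
  cases combined_cve_data_all with
  | none =>
    dsimp only []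
    rw [pv_bucket (fun item => (PySem.Dict.mk dictionary).getD item 0) (dictionary.map Prod.fst) PySem.Dict.empty w]
    simp only [PySem.Dict.getD_empty, List.nil_append]
    rw [PySem.List.foldl_append_singleton_eq_self]
  | some l =>
    dsimp only []
    by_cases hle : l.isEmpty
    · simp only [hle, if_true]
      rw [pv_bucket (fun item => (PySem.Dict.mk dictionary).getD item 0) (dictionary.map Prod.fst) PySem.Dict.empty w]
      simp only [PySem.Dict.getD_empty, List.nil_append]
      rw [PySem.List.foldl_append_singleton_eq_self]
    · have hle' : l.isEmpty = false := by simpa using hle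
      simp only [hle', Bool.false_eq_true, if_false]
      rw [pv_bucket (fun item => (PySem.Dict.mk dictionary).getD item 0) (dictionary.map Prod.fst) PySem.Dict.empty w]
      simp only [PySem.Dict.getD_empty, List.nil_append]

-- the canonical form shared by A and B
set_option maxHeartbeats 1000000 in
lemma pv_main (dictionary : List (String × Int)) (cp : String → List Char)
    (HQ : (dictionary.map Prod.fst).Pairwise (fun a b =>
      (PySem.Dict.mk dictionary).getD a 0 = (PySem.Dict.mk dictionary).getD b 0 → cp a ≠ cp b)) :
    PySem.List.sorted (PySem.List.sorted (dictionary.map Prod.fst) cp false)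
      (fun item => (PySem.Dict.mk dictionary).getD item 0) true
    = (PySem.List.sorted
        ((PySem.Set.ofList ((dictionary.map Prod.fst).map (fun item => (PySem.Dict.mk dictionary).getD item 0))) : List Int)
        (fun w => w) true).flatMap
      (fun w => PySem.List.sorted
        ((dictionary.map Prod.fst).filter (fun k => (PySem.Dict.mk dictionary).getD k 0 == w))
        cp false) := by
  set keys := dictionary.map Prod.fst with hkeysdef
  set wt : String → Int := fun item => (PySem.Dict.mk dictionary).getD item 0 with hwtdef
  set ws := PySem.List.sorted ((PySem.Set.ofList (keys.map wt)) : List Int) (fun w => w) true with hwsdef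
  have hwsperm : (ws : List Int).Perm (PySem.Set.ofList (keys.map wt)) := PySem.List.sorted_perm _ _ _
  have hwsnd : ws.Nodup := hwsperm.nodup_iff.2 (PySem.Set.nodup_ofList _)
  have hwspair : ws.Pairwise (fun a b => b < a) := by
    have h1 := PySem.List.sorted_pairwise_rev ((PySem.Set.ofList (keys.map wt)) : List Int) (fun w => w)
    exact (h1.and hwsnd).imp (fun {a b} h => lt_of_le_of_ne h.1 (Ne.symm h.2))
  have hcov : ∀ k ∈ keys, wt k ∈ ws := by
    intro k hk
    rw [hwsdef, PySem.List.mem_sorted, PySem.Set.mem_ofList]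
    exact List.mem_map_of_mem hk
  have hLperm : (PySem.List.sorted (PySem.List.sorted keys cp false) wt true).Perm keys :=
    (PySem.List.sorted_perm _ _ _).trans (PySem.List.sorted_perm _ _ _)
  have hLpair : (PySem.List.sorted (PySem.List.sorted keys cp false) wt true).Pairwise (pvR wt cp) :=
    pv_B_pairwise wt cp keys HQ
  have hRperm : (ws.flatMap (fun w => PySem.List.sorted (keys.filter (fun k => wt k == w)) cp false)).Perm keys :=
    (pv_flatMap_perm _ _ ws (fun w _ => PySem.List.sorted_perm _ _ _)).trans
      (pv_partition wt ws keys hwsnd hcov)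
  have hRpair : (ws.flatMap (fun w => PySem.List.sorted (keys.filter (fun k => wt k == w)) cp false)).Pairwise (pvR wt cp) := by
    rw [List.flatMap_def, List.pairwise_flatten]
    constructor
    · intro chunk hchunk
      rcases List.mem_map.1 hchunk with ⟨w, _, rfl⟩
      have hwtw : ∀ k ∈ PySem.List.sorted (keys.filter (fun k => wt k == w)) cp false, wt k = w := by
        intro k hk
        have := (PySem.List.mem_sorted _ _ _ _).1 hk
        exact by simpa using (List.mem_filter.1 this).2
      have hgq : (keys.filter (fun k => wt k == w)).Pairwise (fun a b => wt a = wt b → cp a ≠ cp b) :=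
        HQ.sublist List.filter_sublist
      have hsym : ∀ {a b : String}, (wt a = wt b → cp a ≠ cp b) → (wt b = wt a → cp b ≠ cp a) :=
        fun h he hc => h he.symm hc.symm
      have hgq2 : (PySem.List.sorted (keys.filter (fun k => wt k == w)) cp false).Pairwise
          (fun a b => wt a = wt b → cp a ≠ cp b) :=
        ((PySem.List.sorted_perm (keys.filter (fun k => wt k == w)) cp false).pairwise_iff @hsym).2 hgq
      have hle : (PySem.List.sorted (keys.filter (fun k => wt k == w)) cp false).Pairwise
          (fun a b => cp a ≤ cp b) := by
        have := PySem.List.sorted_pairwise (keys.filter (fun k => wt k == w)) cp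
        rwa [← pv_instEq] at this
      refine ((hle.and hgq2).imp_of_mem ?_)
      intro a b ha hb h
      have heq : wt a = wt b := by rw [hwtw a ha, hwtw b hb]
      exact Or.inr ⟨heq, lt_of_le_of_ne h.1 (h.2 heq)⟩
    · refine List.pairwise_map.2 (hwspair.imp ?_)
      intro w1 w2 hlt a ha b hb
      have hwa : wt a = w1 := by
        have := (PySem.List.mem_sorted _ _ _ _).1 ha
        simpa using (List.mem_filter.1 this).2
      have hwb : wt b = w2 := by
        have := (PySem.List.mem_sorted _ _ _ _).1 hb
        simpa using (List.mem_filter.1 this).2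
      exact Or.inl (by omega)
  exact pv_eq_of_perm wt cp (hLperm.trans hRperm.symm) hLpair hRpair

-- ===== VERDICT (by name: the statement is the Claim_ definition above) =====
set_option maxHeartbeats 1000000 in
theorem get_sorted_list_from_weighted_dict_spec : Claim_unchanged_get_sorted_list_from_weighted_dict := by
  intro dictionary combined _ hpre
  unfold Spec_get_sorted_list_from_weighted_dict
  intro hnd
  rw [pv_A_eq, pv_alt_eq]
  rcases hpre with ⟨hnodup, _⟩
  have hQid : (dictionary.map Prod.fst).Pairwise (fun a b =>
      (PySem.Dict.mk dictionary).getD a 0 = (PySem.Dict.mk dictionary).getD b 0 →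
        (fun item : String => item.toList) a ≠ (fun item : String => item.toList) b) :=
    hnodup.imp (fun {a b} h _ hc => h (String.toList_injective hc))
  cases combined with
  | none =>
    refine Eq.trans (PySem.List.foldl_congr_mem _ _
      (fun acc w => acc ++ PySem.List.sorted
        ((dictionary.map Prod.fst).filter (fun k => (PySem.Dict.mk dictionary).getD k 0 == w))
        (fun x => x.toList) false) _ (fun acc w _ => rfl)) ?_
    rw [PySem.List.foldl_append_eq_flatMap, List.nil_append]
    exact (pv_main dictionary (fun item => item.toList) hQid).symm
  | some l =>
    by_cases hle : l.isEmpty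
    · have hl0 : l = [] := by simpa using hle
      subst hl0
      refine Eq.trans (PySem.List.foldl_congr_mem _ _
        (fun acc w => acc ++ PySem.List.sorted
          ((dictionary.map Prod.fst).filter (fun k => (PySem.Dict.mk dictionary).getD k 0 == w))
          (fun x => x.toList) false) _ (fun acc w _ => rfl)) ?_
      rw [PySem.List.foldl_append_eq_flatMap, List.nil_append]
      exact (pv_main dictionary (fun item => item.toList) hQid).symm
    · have hle' : l.isEmpty = false := by simpa using hle
      have hlne : l ≠ [] := by
        intro h; subst h; simp at hle'
      have HQ : (dictionary.map Prod.fst).Pairwise (fun a b =>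
          (PySem.Dict.mk dictionary).getD a 0 = (PySem.Dict.mk dictionary).getD b 0 →
          pvSecondaryId l a ≠ pvSecondaryId l b) :=
        pv_HQ_of_not_D dictionary l hnodup hlne hnd
      have hgrp : ∀ w : Int, (((dictionary.map Prod.fst).filter
          (fun k => (PySem.Dict.mk dictionary).getD k 0 == w)).map (pvSecondaryId l)).Nodup := by
        intro w
        refine List.pairwise_map.2 ?_
        refine (HQ.sublist List.filter_sublist).imp_of_mem ?_
        intro a b ha hb h
        have hwa : (PySem.Dict.mk dictionary).getD a 0 = w := by simpa using (List.mem_filter.1 ha).2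
        have hwb : (PySem.Dict.mk dictionary).getD b 0 = w := by simpa using (List.mem_filter.1 hb).2
        exact h (by omega)
      refine Eq.trans (PySem.List.foldl_congr_mem _ _
        (fun acc w => acc ++ PySem.List.sorted
          ((dictionary.map Prod.fst).filter (fun k => (PySem.Dict.mk dictionary).getD k 0 == w))
          (fun item => (pvSecondaryId l item).toList) false) _
        (fun acc w _ => by
          dsimp only []
          simp only [hle', Bool.false_eq_true, if_false]
          exact pv_truthy_chunk l _ acc (hgrp w))) ?_
      rw [PySem.List.foldl_append_eq_flatMap, List.nil_append]
      have hmain := (pv_main dictionary (fun item => (pvSecondaryId l item).toList)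
        (HQ.imp (fun {a b} h he hc => h he (String.toList_injective hc)))).symm
      have hkf : (fun item => (pvKeyFn (some l) item).toList) = (fun item => (pvSecondaryId l item).toList) := by
        funext item
        simp [pvKeyFn, hle']
      rw [hkf]
      exact hmain

set_option maxHeartbeats 4000000 in
theorem get_sorted_list_from_weighted_dict_changed : Claim_changed_get_sorted_list_from_weighted_dict := by
  unfold Claim_changed_get_sorted_list_from_weighted_dict; decide

set_option maxHeartbeats 1000000 in
theorem get_sorted_list_from_weighted_dict_tight : Claim_exact_get_sorted_list_from_weighted_dict := by
  intro dictionary combined _ hpre hD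
  rcases hD with ⟨l, hl, hlne, a, ha, b, hb, hab, hw, hideq⟩
  cases combined with
  | none => simp at hl
  | some l' =>
    have hll : l = l' := by simpa using hl
    subst hll
    have hle' : l.isEmpty = false := by
      cases l with
      | nil => exact absurd rfl hlne
      | cons a t => rfl
    have hab1 : a.1 ≠ b.1 := by
      intro h
      exact hab (pv_map_nodup_inj Prod.fst dictionary hpre.1 a ha b hb h)
    set keys := dictionary.map Prod.fst with hkeysdef
    set wt : String → Int := fun item => (PySem.Dict.mk dictionary).getD item 0 with hwtdef
    have hweq : wt a.1 = wt b.1 := by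
      rw [hwtdef]
      dsimp only []
      rw [pv_getD_of_mem dictionary hpre.1 a ha, pv_getD_of_mem dictionary hpre.1 b hb]
      exact hw
    set ws := PySem.List.sorted ((PySem.Set.ofList (keys.map wt)) : List Int) (fun w => w) true with hwsdef
    have hwsperm : (ws : List Int).Perm (PySem.Set.ofList (keys.map wt)) := PySem.List.sorted_perm _ _ _
    have hwsnd : ws.Nodup := hwsperm.nodup_iff.2 (PySem.Set.nodup_ofList _)
    have hcov : ∀ k ∈ keys, wt k ∈ ws := by
      intro k hk
      rw [hwsdef, PySem.List.mem_sorted, PySem.Set.mem_ofList]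
      exact List.mem_map_of_mem hk
    have hlenA : (get_sorted_list_from_weighted_dict dictionary (some l)).length
        = (ws.map (fun w => (PySem.Set.ofList ((keys.filter (fun k => wt k == w)).map (pvSecondaryId l))).length)).sum := by
      rw [pv_A_eq]
      refine Eq.trans (congrArg List.length (PySem.List.foldl_congr_mem _ _
        (fun acc w => acc ++ (PySem.List.sorted
            (((keys.filter (fun k => wt k == w)).foldl
              (fun (d : PySem.Dict String String) item => d.insert (pvSecondaryId l item) item)
              PySem.Dict.empty).keys) (fun x => x.toList) false).map
            (fun new_id => ((keys.filter (fun k => wt k == w)).foldl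
              (fun (d : PySem.Dict String String) item => d.insert (pvSecondaryId l item) item)
              PySem.Dict.empty).getD new_id "")) _
        (fun acc w _ => by
          dsimp only []
          simp only [hle', Bool.false_eq_true, if_false]
          exact PySem.List.foldl_append_singleton_eq_map _ _ acc))) ?_
      rw [PySem.List.foldl_append_eq_flatMap, List.nil_append, List.length_flatMap]
      congr 1
      refine List.map_congr_left ?_
      intro w _
      rw [List.length_map, PySem.List.length_sorted]
      have hk : (((keys.filter (fun k => wt k == w)).foldl
          (fun (d : PySem.Dict String String) item => d.insert (pvSecondaryId l item) item)
          PySem.Dict.empty).keys) = PySem.Set.update (PySem.Dict.empty : PySem.Dict String String).keys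
            ((keys.filter (fun k => wt k == w)).map (pvSecondaryId l)) :=
        PySem.Dict.keys_foldl_insert_key _ _ _ _
      rw [hk]
      have he : (PySem.Dict.empty : PySem.Dict String String).keys = ([] : List String) := rfl
      rw [he, PySem.Set.update_nil_left]
    have hlenB : (get_sorted_list_from_weighted_dict_alt dictionary (some l)).length = keys.length := by
      rw [pv_alt_eq, PySem.List.length_sorted, PySem.List.length_sorted]
    have hkeyslen : keys.length = (ws.map (fun w => (keys.filter (fun k => wt k == w)).length)).sum := by
      have hp := pv_partition wt ws keys hwsnd hcov
      rw [← hp.length_eq, List.length_flatMap]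
    have hamem : a.1 ∈ keys := List.mem_map_of_mem ha
    have hbmem : b.1 ∈ keys := List.mem_map_of_mem hb
    have hga : a.1 ∈ keys.filter (fun k => wt k == wt a.1) := List.mem_filter.2 ⟨hamem, by simp⟩
    have hgb : b.1 ∈ keys.filter (fun k => wt k == wt a.1) := List.mem_filter.2 ⟨hbmem, by simp only [beq_iff_eq]; exact hweq.symm⟩
    have hdup : ¬ ((keys.filter (fun k => wt k == wt a.1)).map (pvSecondaryId l)).Nodup := by
      intro hn
      exact hab1 (pv_map_nodup_inj _ _ hn a.1 hga b.1 hgb hideq)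
    have hstrict : (PySem.Set.ofList ((keys.filter (fun k => wt k == wt a.1)).map (pvSecondaryId l))).length
        < (keys.filter (fun k => wt k == wt a.1)).length := by
      have h1 := pv_len_ofList_lt _ hdup
      have h2 : (List.map (pvSecondaryId l) (keys.filter (fun k => wt k == wt a.1))).length
          = (keys.filter (fun k => wt k == wt a.1)).length := by simp
      omega
    have hlt : (get_sorted_list_from_weighted_dict dictionary (some l)).length
        < (get_sorted_list_from_weighted_dict_alt dictionary (some l)).length := by
      rw [hlenA, hlenB, hkeyslen]
      refine List.sum_lt_sum _ _ ?_ ⟨wt a.1, hcov a.1 hamem, hstrict⟩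
      intro w _
      have h1 := PySem.Set.length_ofList_le ((keys.filter (fun k => wt k == w)).map (pvSecondaryId l))
      have h2 : (List.map (pvSecondaryId l) (keys.filter (fun k => wt k == w))).length
          = (keys.filter (fun k => wt k == w)).length := by simp
      omega
    intro heq
    rw [heq] at hlt
    exact lt_irrefl _ hlt
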